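-- pv_equiv track=rewrite | github.com/floft/AL | features.py | mean_crossings
-- ===== SOURCE A (Python) =====
-- def mean_crossings(data, mean):
--     """ Compute zero crossings of the input array of data. Mean crossings is
--     computed as the number of times the data value crosses the mean as the
--     sequence is traversed from beginning to end.
--     """
--     rel = 0
--     count = 0
--     for x in data:
--         if x < mean:
--             if rel > 0:
--                 count += 1
--             rel = -1
--         elif x > mean:
--             if rel < 0:
--                 count += 1
--             rel = 1
--     return count
-- ===== SOURCE B (Python) =====
-- def mean_crossings(data, mean):
--     signs = [-1 if x < mean else 1 for x in data if x < mean or x > mean]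
--     return sum(1 for a, b in zip(signs, signs[1:]) if a != b)
-- ===== Notes on version B (the rewrite author's own statement) =====
-- stated objective: alternative
-- what changed: Replaces A's single stateful pass tracking a rel flag with a build-then-compare decomposition: first project the data to a filtered sign list, then count adjacent sign transitions over zipped pairs.
import Mathlib
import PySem

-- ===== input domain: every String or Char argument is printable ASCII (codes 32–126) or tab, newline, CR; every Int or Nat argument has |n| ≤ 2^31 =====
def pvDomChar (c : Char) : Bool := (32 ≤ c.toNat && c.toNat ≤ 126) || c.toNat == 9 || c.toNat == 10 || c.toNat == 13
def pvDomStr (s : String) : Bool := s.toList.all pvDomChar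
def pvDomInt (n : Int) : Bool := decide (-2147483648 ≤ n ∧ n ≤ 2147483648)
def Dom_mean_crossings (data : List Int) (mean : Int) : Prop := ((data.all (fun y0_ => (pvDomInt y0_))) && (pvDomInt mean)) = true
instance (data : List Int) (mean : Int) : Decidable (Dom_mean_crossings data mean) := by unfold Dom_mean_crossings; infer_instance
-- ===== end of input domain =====

-- B replaces A's single stateful pass (rel flag) with a build-then-compare decomposition:
-- project to a filtered sign list, then count adjacent sign transitions (alternative, same cost).


-- ===== PORT A =====
-- state = (rel, count); branch order as in the Python
def stepA (mean : Int) (s : Int × Int) (x : Int) : Int × Int :=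
  if x < mean then (-1, if s.1 > 0 then s.2 + 1 else s.2)
  else if x > mean then (1, if s.1 < 0 then s.2 + 1 else s.2)
  else s

def mean_crossings (data : List Int) (mean : Int) : Int :=
  (data.foldl (stepA mean) (0, 0)).2

-- ===== PORT B =====
-- signs = [-1 if x < mean else 1 for x in data if x < mean or x > mean]
def signsOf (data : List Int) (mean : Int) : List Int :=
  data.filterMap (fun x => if x < mean ∨ x > mean then some (if x < mean then -1 else 1) else none)

-- sum(1 for a, b in zip(signs, signs[1:]) if a != b)
def mean_crossings_alt (data : List Int) (mean : Int) : Int :=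
  let signs := signsOf data mean
  (signs.zip signs.tail).foldl (fun c p => if p.1 ≠ p.2 then c + 1 else c) 0

-- ===== PRECONDITION & SPEC =====
def Spec_mean_crossings (data : List Int) (mean : Int) (out : Int) : Prop := out = mean_crossings_alt data mean
instance (data : List Int) (mean : Int) (out : Int) : Decidable (Spec_mean_crossings data mean out) := by unfold Spec_mean_crossings; infer_instance

-- ===== CLAIM (what is proved, stated in full; the proofs are below) =====
def Claim_equal_mean_crossings : Prop := ∀ (data : List Int) (mean : Int), Dom_mean_crossings data mean → Spec_mean_crossings data mean (mean_crossings data mean)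

-- ===== LEMMAS AND PROOFS =====

-- A's step, restated on a sign g ∈ {-1, 1} instead of a data value
def stepS (s : Int × Int) (g : Int) : Int × Int :=
  if g < 0 then (-1, if s.1 > 0 then s.2 + 1 else s.2)
  else (1, if s.1 < 0 then s.2 + 1 else s.2)

-- crossing count of a sign list, given the previous sign (0 = none yet)
def pc (prev : Int) : List Int → Int
  | [] => 0
  | g :: t => if g < 0 then (if prev > 0 then 1 else 0) + pc (-1) t
              else (if prev < 0 then 1 else 0) + pc 1 t

-- count of adjacent unequal pairs, recursively
def pcNe (prev : Int) : List Int → Int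
  | [] => 0
  | g :: t => (if prev ≠ g then 1 else 0) + pcNe g t

theorem signsOf_cons_lt {x mean : Int} (h : x < mean) (t : List Int) :
    signsOf (x :: t) mean = -1 :: signsOf t mean := by
  unfold signsOf
  rw [List.filterMap_cons, if_pos (Or.inl h), if_pos h]

theorem signsOf_cons_gt {x mean : Int} (h : mean < x) (t : List Int) :
    signsOf (x :: t) mean = 1 :: signsOf t mean := by
  unfold signsOf
  rw [List.filterMap_cons, if_pos (Or.inr h), if_neg (not_lt_of_gt h)]

theorem signsOf_cons_eq {x mean : Int} (h : x = mean) (t : List Int) :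
    signsOf (x :: t) mean = signsOf t mean := by
  subst h
  unfold signsOf
  rw [List.filterMap_cons, if_neg (by omega : ¬ (x < x ∨ x > x))]

theorem foldA_eq_foldS (mean : Int) (data : List Int) (s : Int × Int) :
    data.foldl (stepA mean) s = (signsOf data mean).foldl stepS s := by
  induction data generalizing s with
  | nil => rfl
  | cons x t ih =>
    rcases lt_trichotomy x mean with h | h | h
    · have ha : stepA mean s x = stepS s (-1) := by
        simp [stepA, stepS, h]
      rw [signsOf_cons_lt h, List.foldl_cons, List.foldl_cons, ha, ih]
    · have ha : stepA mean s x = s := by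
        subst h; simp [stepA]
      rw [signsOf_cons_eq h, List.foldl_cons, ha, ih]
    · have ha : stepA mean s x = stepS s 1 := by
        have h1 : ¬ x < mean := not_lt_of_gt h
        have h2 : ¬ (1 : Int) < 0 := by norm_num
        simp [stepA, stepS, h1, h, h2]
      rw [signsOf_cons_gt h, List.foldl_cons, List.foldl_cons, ha, ih]

theorem foldS_count (l : List Int) (s : Int × Int) :
    (l.foldl stepS s).2 = s.2 + pc s.1 l := by
  induction l generalizing s with
  | nil => simp [pc]
  | cons g t ih =>
    rw [List.foldl_cons, ih]
    by_cases hg : g < 0 <;> by_cases hr : s.1 > 0 <;> by_cases hr2 : s.1 < 0 <;>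
      simp [stepS, pc, hg, hr, hr2] <;> ring

theorem pc_eq_pcNe (l : List Int) (prev : Int)
    (hl : ∀ s ∈ l, s = -1 ∨ s = 1) (hp : prev = -1 ∨ prev = 1) :
    pc prev l = pcNe prev l := by
  induction l generalizing prev with
  | nil => rfl
  | cons g t ih =>
    have hg : g = -1 ∨ g = 1 := hl g (by simp)
    have ht : ∀ s ∈ t, s = -1 ∨ s = 1 := fun s hs => hl s (by simp [hs])
    have ihm := ih (-1) ht (Or.inl rfl)
    have ihp := ih 1 ht (Or.inr rfl)
    rcases hg with hg | hg <;> subst hg <;> rcases hp with hp | hp <;> subst hp <;>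
      simp [pc, pcNe, ihm, ihp]

theorem zipfold_eq_pcNe (t : List Int) (prev c : Int) :
    (((prev :: t).zip t).foldl (fun c p => if p.1 ≠ p.2 then c + 1 else c) c) = c + pcNe prev t := by
  induction t generalizing prev c with
  | nil => simp [pcNe]
  | cons s u ih =>
    have hz : (prev :: s :: u).zip (s :: u) = (prev, s) :: ((s :: u).zip u) := rfl
    rw [hz, List.foldl_cons, ih]
    by_cases h : prev = s <;> simp [pcNe, h] <;> ring

theorem signsOf_mem (data : List Int) (mean : Int) :
    ∀ s ∈ signsOf data mean, s = -1 ∨ s = 1 := by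
  intro s hs
  simp only [signsOf, List.mem_filterMap] at hs
  obtain ⟨x, -, hx⟩ := hs
  by_cases h1 : x < mean ∨ x > mean
  · simp only [h1, if_true, Option.some.injEq] at hx
    split_ifs at hx <;> omega
  · simp [h1] at hx

theorem pc_zero_eq (l : List Int) (hl : ∀ s ∈ l, s = -1 ∨ s = 1) :
    pc 0 l = (l.zip l.tail).foldl (fun c p => if p.1 ≠ p.2 then c + 1 else c) 0 := by
  cases l with
  | nil => rfl
  | cons g t =>
    have ht : ∀ s ∈ t, s = -1 ∨ s = 1 := fun s hs => hl s (by simp [hs])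
    have hg : g = -1 ∨ g = 1 := hl g (by simp)
    have h1 : pc 0 (g :: t) = pc g t := by
      rcases hg with hg | hg <;> subst hg <;> simp [pc]
    have h2 : (g :: t).tail = t := rfl
    rw [h1, pc_eq_pcNe t g ht hg, h2, zipfold_eq_pcNe t g 0, zero_add]

-- ===== VERDICT (by name: the statement is the Claim_ definition above) =====
theorem mean_crossings_spec : Claim_equal_mean_crossings := by
  intro data mean _
  unfold Spec_mean_crossings mean_crossings mean_crossings_alt
  rw [foldA_eq_foldS, foldS_count]
  simpa using pc_zero_eq (signsOf data mean) (signsOf_mem data mean)
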